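-- pv_equiv track=rewrite | github.com/chinanuekperechinedu/Crazy_8 | CRAZY_EIGHTS.py | computer_choice
-- ===== SOURCE A (Python) =====
-- def computer_choice(player_hand, tp_card):
--     selected_card = ""
--     matched_card = []
--     cardz = []
--     for hand in player_hand:
--         for rs in tp_card:
--             if rs in hand:
--                 matched_card.append(hand)
--
--     for card in matched_card:
--         if '8' in card or 'K' in card or 'J' in card or 'Q' in card or '10' in card:
--             selected_card = card
--             return selected_card
--         elif 'A' not in card:
--             cardz.append(card)
--         else:
--             selected_card = card
--             return selected_card
--
--     selected_card = max(cardz)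
--     return selected_card
-- ===== SOURCE B (Python) =====
-- def computer_choice(player_hand, tp_card):
--     plain = []
--     for card in player_hand:
--         if any(ch in card for ch in tp_card):
--             if ('8' in card or 'K' in card or 'J' in card or 'Q' in card
--                     or '10' in card or 'A' in card):
--                 return card
--             plain.append(card)
--     return max(plain)
-- ===== Notes on version B (the rewrite author's own statement) =====
-- stated objective: faster
-- what changed: B makes a single pass over player_hand (short-circuit any() match test, immediate return on special/Ace cards, one list of plain matched cards) and ends with max(plain), instead of A's two phases that first build matched_card with one copy of a card per matching character and then rescan it; Pre_ excludes inputs where no hand card shares a character with tp_card, on which both programs raise ValueError from max of an empty list.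
import Mathlib
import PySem

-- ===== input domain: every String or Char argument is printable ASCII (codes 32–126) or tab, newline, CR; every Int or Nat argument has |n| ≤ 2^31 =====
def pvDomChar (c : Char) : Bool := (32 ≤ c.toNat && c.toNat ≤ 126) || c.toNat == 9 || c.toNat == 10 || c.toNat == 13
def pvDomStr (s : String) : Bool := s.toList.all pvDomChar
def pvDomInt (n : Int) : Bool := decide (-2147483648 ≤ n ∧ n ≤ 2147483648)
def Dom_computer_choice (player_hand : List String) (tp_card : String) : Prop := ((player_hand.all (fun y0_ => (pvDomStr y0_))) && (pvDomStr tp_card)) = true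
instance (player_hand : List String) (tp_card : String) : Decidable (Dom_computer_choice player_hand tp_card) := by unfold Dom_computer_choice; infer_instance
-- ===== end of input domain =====

-- B makes one pass over player_hand (short-circuit match test, immediate return on
-- special/Ace, one plain-card list ending in max) instead of A's build-matched-list-then-rescan;
-- intended as faster by never materialising the per-matching-character duplicated matched_card list.


-- ===== PORT A =====
-- the "'8' in card or 'K' in card or ..." test of A's second loop
def pvSpecial (card : String) : Bool :=
  PySem.Str.isIn "8" card || PySem.Str.isIn "K" card || PySem.Str.isIn "J" card ||
  PySem.Str.isIn "Q" card || PySem.Str.isIn "10" card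

-- A's second loop over matched_card, threading the cardz accumulator;
-- the [] base is max(cardz): PySem.List.max?, .getD "" marking the ValueError case excluded by Pre_
def pvScanA : List String → List String → String
  | [], cardz => (PySem.List.max? cardz (fun y => y)).getD ""
  | card :: rest, cardz =>
    if pvSpecial card then card
    else if !(PySem.Str.isIn "A" card) then pvScanA rest (cardz ++ [card])
    else card

def computer_choice (player_hand : List String) (tp_card : String) : String :=
  let matched_card := player_hand.foldl (fun acc hand =>
    tp_card.toList.foldl (fun acc2 rs =>
      if PySem.Str.isIn (String.ofList [rs]) hand then acc2 ++ [hand] else acc2) acc) []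
  pvScanA matched_card []

-- ===== PORT B =====
-- B's combined "'8' in card or ... or '10' in card or 'A' in card" test
def pvSpecialA (card : String) : Bool := pvSpecial card || PySem.Str.isIn "A" card

-- B's single loop, threading the plain-card list; the [] base is max(plain):
-- .getD "" marks the ValueError case excluded by Pre_
def pvLoopB (tp_card : String) : List String → List String → String
  | [], plain => (PySem.List.max? plain (fun y => y)).getD ""
  | card :: rest, plain =>
    if tp_card.toList.any (fun ch => PySem.Str.isIn (String.ofList [ch]) card) then
      if pvSpecialA card then card
      else pvLoopB tp_card rest (plain ++ [card])
    else pvLoopB tp_card rest plain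

def computer_choice_alt (player_hand : List String) (tp_card : String) : String :=
  pvLoopB tp_card player_hand []

-- ===== PRECONDITION & SPEC =====
-- Pre_ excludes exactly the inputs where no hand card shares a character with tp_card:
-- there A ends with max([]) and raises ValueError (B raises ValueError there too).
def Pre_computer_choice (player_hand : List String) (tp_card : String) : Prop :=
  player_hand.any (fun hand =>
    tp_card.toList.any (fun rs => PySem.Str.isIn (String.ofList [rs]) hand)) = true
instance (player_hand : List String) (tp_card : String) : Decidable (Pre_computer_choice player_hand tp_card) := by unfold Pre_computer_choice; infer_instance
def pvWitness_computer_choice : List String × String := (["2H", "8D"], "2S")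

def Spec_computer_choice (player_hand : List String) (tp_card : String) (out : String) : Prop := out = computer_choice_alt player_hand tp_card
instance (player_hand : List String) (tp_card : String) (out : String) : Decidable (Spec_computer_choice player_hand tp_card out) := by unfold Spec_computer_choice; infer_instance

-- ===== CLAIM (what is proved, stated in full; the proofs are below) =====
def Claim_equal_computer_choice : Prop := ∀ (player_hand : List String) (tp_card : String), Dom_computer_choice player_hand tp_card → Pre_computer_choice player_hand tp_card → Spec_computer_choice player_hand tp_card (computer_choice player_hand tp_card)

-- ===== LEMMAS AND PROOFS =====

-- 'best = max(best, card)' step used to compare the two accumulators through their running max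
def pvUpd (best : Option String) (card : String) : Option String :=
  match best with
  | none => some card
  | some b => if b < card then some card else some b

theorem pvUpd_fold_eq_max (t : List String) (x : String) :
    t.foldl pvUpd (some x) = some (t.foldl max x) := by
  induction t generalizing x with
  | nil => rfl
  | cons y t ih =>
    rw [List.foldl_cons, List.foldl_cons]
    by_cases h : x < y
    · rw [show pvUpd (some x) y = some y by simp [pvUpd, h], ih, max_eq_right h.le]
    · rw [show pvUpd (some x) y = some x by simp [pvUpd, h], ih, max_eq_left (not_lt.mp h)]

theorem pvMax_eq_fold (cardz : List String) :
    (PySem.List.max? cardz (fun y => y)).getD "" = (cardz.foldl pvUpd none).getD "" := by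
  cases cardz with
  | nil => rfl
  | cons x t =>
    rw [PySem.List.max?_id_cons, List.foldl_cons,
      show pvUpd none x = some x from rfl, pvUpd_fold_eq_max]

theorem pvUpd_idem (b : Option String) (h : String) : pvUpd (pvUpd b h) h = pvUpd b h := by
  cases b with
  | none => simp [pvUpd]
  | some b =>
    simp only [pvUpd]
    by_cases hb : b < h
    · simp [hb]
    · simp [hb]

theorem pvUpd_fold_const (ms : List String) (h : String) (hall : ∀ m ∈ ms, m = h) :
    ∀ b, ms ≠ [] → ms.foldl pvUpd b = pvUpd b h := by
  induction ms with
  | nil => intro b hne; exact absurd rfl hne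
  | cons m rest ih =>
    intro b _
    have hm : m = h := hall m (by simp)
    subst hm
    cases rest with
    | nil => rfl
    | cons r rs =>
      rw [List.foldl_cons, ih (fun x hx => hall x (List.mem_cons_of_mem _ hx)) _ (by simp),
        pvUpd_idem]

theorem pvScanA_plain (h : String) (hs : pvSpecial h = false) (hA : PySem.Str.isIn "A" h = false) :
    ∀ (ms rest cardz : List String), (∀ m ∈ ms, m = h) →
    pvScanA (ms ++ rest) cardz = pvScanA rest (cardz ++ ms) := by
  intro ms
  induction ms with
  | nil => intro rest cardz _; simp
  | cons m tl ih =>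
    intro rest cardz hall
    have hm : m = h := hall m (by simp)
    rw [List.cons_append, hm]
    have hAc : PySem.Chars.isIn ['A'] h.toList = false := by simpa using hA
    have step : pvScanA (h :: (tl ++ rest)) cardz = pvScanA (tl ++ rest) (cardz ++ [h]) := by
      simp [pvScanA, hs, hAc]
    rw [step, ih rest (cardz ++ [h]) (fun x hx => hall x (List.mem_cons_of_mem _ hx))]
    rw [show cardz ++ h :: tl = (cardz ++ [h]) ++ tl by simp]

theorem pvMain (tp : String) :
    ∀ (hands : List String) (cardz plain : List String),
    cardz.foldl pvUpd none = plain.foldl pvUpd none →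
    pvScanA (hands.flatMap (fun hand =>
        (tp.toList.filter (fun rs => PySem.Str.isIn (String.ofList [rs]) hand)).map (fun _ => hand)))
      cardz = pvLoopB tp hands plain := by
  intro hands
  induction hands with
  | nil =>
    intro cardz plain heq
    show (PySem.List.max? cardz (fun y => y)).getD "" = (PySem.List.max? plain (fun y => y)).getD ""
    rw [pvMax_eq_fold, pvMax_eq_fold, heq]
  | cons h t ih =>
    intro cardz plain heq
    rw [List.flatMap_cons]
    by_cases hmatch : (tp.toList.any (fun ch => PySem.Str.isIn (String.ofList [ch]) h)) = true
    · obtain ⟨c, hc, hpc⟩ := List.any_eq_true.mp hmatch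
      have hfil : (tp.toList.filter (fun rs => PySem.Str.isIn (String.ofList [rs]) h)) ≠ [] := by
        intro hnil
        have hmem : c ∈ tp.toList.filter (fun rs => PySem.Str.isIn (String.ofList [rs]) h) :=
          List.mem_filter.mpr ⟨hc, hpc⟩
        rw [hnil] at hmem
        exact absurd hmem (List.not_mem_nil)
      obtain ⟨f, fs, hfe⟩ := List.exists_cons_of_ne_nil hfil
      have hB : pvLoopB tp (h :: t) plain =
          (if pvSpecialA h then h else pvLoopB tp t (plain ++ [h])) := by
        simp only [pvLoopB, hmatch, if_true]
      rw [hB]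
      by_cases hsp : pvSpecial h = true
      · rw [hfe, List.map_cons, List.cons_append]
        simp only [pvScanA, hsp, if_true]
        rw [if_pos (by simp [pvSpecialA, hsp])]
      · have hs' : pvSpecial h = false := by simpa using hsp
        by_cases hA : PySem.Str.isIn "A" h = true
        · have hAc : PySem.Chars.isIn ['A'] h.toList = true := by simpa using hA
          rw [hfe, List.map_cons, List.cons_append,
            if_pos (by simp [pvSpecialA]; exact Or.inr hAc)]
          simp [pvScanA, hs', hAc]
        · -- plain matched card
          have hA' : PySem.Str.isIn "A" h = false := by simpa using hA
          have hall : ∀ m ∈ (tp.toList.filter (fun rs => PySem.Str.isIn (String.ofList [rs]) h)).map (fun _ => h), m = h := by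
            intro m hm
            obtain ⟨a, -, ha⟩ := List.mem_map.mp hm
            exact ha.symm
          have hne : (tp.toList.filter (fun rs => PySem.Str.isIn (String.ofList [rs]) h)).map (fun _ => h) ≠ [] := by
            rw [hfe]; simp
          rw [if_neg (by simp [pvSpecialA, hs']; simpa using hA'),
            pvScanA_plain h hs' hA' _ _ cardz hall]
          exact ih (cardz ++ _) (plain ++ [h]) (by
            rw [List.foldl_append, List.foldl_append,
              pvUpd_fold_const _ h hall _ hne, heq]
            rfl)
    · have hfil : (tp.toList.filter (fun rs => PySem.Str.isIn (String.ofList [rs]) h)) = [] := by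
        rw [List.filter_eq_nil_iff]
        intro a ha
        by_contra hpa
        exact hmatch (List.any_eq_true.mpr ⟨a, ha, by simpa using hpa⟩)
      rw [hfil, List.map_nil, List.nil_append, ih cardz plain heq]
      have hB : pvLoopB tp (h :: t) plain = pvLoopB tp t plain := by
        simp only [pvLoopB, hmatch]
        rfl
      rw [hB]

theorem pvMatched_eq (player_hand : List String) (tp : String) :
    player_hand.foldl (fun acc hand =>
      tp.toList.foldl (fun acc2 rs =>
        if PySem.Str.isIn (String.ofList [rs]) hand then acc2 ++ [hand] else acc2) acc) []
    = player_hand.flatMap (fun hand =>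
        (tp.toList.filter (fun rs => PySem.Str.isIn (String.ofList [rs]) hand)).map (fun _ => hand)) := by
  rw [PySem.List.foldl_congr_mem player_hand _
      (fun acc hand => acc ++ (tp.toList.filter (fun rs => PySem.Str.isIn (String.ofList [rs]) hand)).map (fun _ => hand)) []
      (fun acc hand _ => PySem.List.foldl_append_if (fun rs => PySem.Str.isIn (String.ofList [rs]) hand) (fun _ => hand) tp.toList acc),
    PySem.List.foldl_append_eq_flatMap, List.nil_append]

-- ===== VERDICT (by name: the statement is the Claim_ definition above) =====
theorem computer_choice_spec : Claim_equal_computer_choice := by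
  intro player_hand tp_card _ _
  unfold Spec_computer_choice computer_choice computer_choice_alt
  rw [pvMatched_eq]
  exact pvMain tp_card player_hand [] [] rfl
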